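-- pv_equiv track=rewrite | github.com/tomjames156/random_people_shuffle | random_shuffling.py | list_title_string
-- ===== SOURCE A (Python) =====
-- def list_title_string(list):
--     """ This function lists all the list items as a single sentence """
--     sentence = ''
--     for i in range(len(list)):
--
--         if(len(list) >= 3):
--             if(i == (len(list) - 2)):
--                 sentence += list[i].title() + ', and '
--             elif(i == (len(list) - 1)):
--                 sentence += list[i].title()
--             else:
--                 sentence += list[i].title() + ", "
--         else:
--             if(i == (len(list) - 2)):
--                 sentence += list[i].title() + ' and '
--             elif(i == (len(list) - 1)):
--                 sentence += list[i].title()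
--             else:
--                 sentence += list[i].title() + ", "
--
--     return sentence
-- ===== SOURCE B (Python) =====
-- def list_title_string(list):
--     """ This function lists all the list items as a single sentence """
--     items = [x.title() for x in list]
--     if not items:
--         return ''
--     if len(items) == 1:
--         return items[0]
--     if len(items) == 2:
--         return items[0] + ' and ' + items[1]
--     return ', '.join(items[:-1]) + ', and ' + items[-1]
-- ===== Notes on version B (the rewrite author's own statement) =====
-- stated objective: simpler
-- what changed: A builds the sentence in one per-index loop that re-tests the list length and the index position on every iteration; B builds the titled items once and dispatches on the length (empty / one / two / three-plus), joining items[:-1] with ', ' and appending ', and ' plus the last item in the Oxford case.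
import Mathlib
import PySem

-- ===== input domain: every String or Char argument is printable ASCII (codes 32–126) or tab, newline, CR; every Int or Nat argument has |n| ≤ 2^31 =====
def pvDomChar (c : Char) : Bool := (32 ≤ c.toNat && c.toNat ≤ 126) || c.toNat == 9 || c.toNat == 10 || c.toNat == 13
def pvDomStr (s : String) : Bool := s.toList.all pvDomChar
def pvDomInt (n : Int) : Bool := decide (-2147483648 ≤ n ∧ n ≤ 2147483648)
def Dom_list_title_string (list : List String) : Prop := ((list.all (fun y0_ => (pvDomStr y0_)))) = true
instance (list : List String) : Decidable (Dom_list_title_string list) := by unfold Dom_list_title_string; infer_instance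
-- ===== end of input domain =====

-- B replaces A's single per-index loop with position tests by building the titled items once
-- and dispatching on the list's length (simpler decomposition; same output on every input).

-- str.title() ported by hand, exact on the ASCII domain: an alphabetic character is
-- uppercased when the previous character is not alphabetic, lowercased otherwise.
def pvTitleChars : List Char → Bool → List Char
  | [], _ => []
  | c :: rest, prev =>
    (if PySem.Chars.isalpha c then
       (if prev then PySem.Chars.lowerChar c else PySem.Chars.upperChar c)
     else c) :: pvTitleChars rest (PySem.Chars.isalpha c)

def pvTitle (s : String) : String := String.ofList (pvTitleChars s.toList false)

-- ===== PORT A =====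
-- the loop body of A, one iteration of 'for i in range(len(list))'
def pvBodyA (list : List String) (sentence : String) (i : Int) : String :=
  if 3 ≤ PySem.List.len list then
    if i = PySem.List.len list - 2 then
      sentence ++ (pvTitle (PySem.List.pyGetD list i "") ++ ", and ")
    else if i = PySem.List.len list - 1 then
      sentence ++ pvTitle (PySem.List.pyGetD list i "")
    else
      sentence ++ (pvTitle (PySem.List.pyGetD list i "") ++ ", ")
  else
    if i = PySem.List.len list - 2 then
      sentence ++ (pvTitle (PySem.List.pyGetD list i "") ++ " and ")
    else if i = PySem.List.len list - 1 then
      sentence ++ pvTitle (PySem.List.pyGetD list i "")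
    else
      sentence ++ (pvTitle (PySem.List.pyGetD list i "") ++ ", ")

def list_title_string (list : List String) : String :=
  (PySem.List.pyRange 0 (PySem.List.len list) 1).foldl (pvBodyA list) ""

-- ===== PORT B =====
def list_title_string_alt (list : List String) : String :=
  let items := list.map pvTitle
  match items with
  | [] => ""
  | [a] => a
  | [a, b] => a ++ " and " ++ b
  | _ =>
    PySem.Str.join ", " (PySem.List.slice items none (some (-1))) ++ ", and " ++
      PySem.List.pyGetD items (-1) ""

-- ===== PRECONDITION & SPEC =====
def Spec_list_title_string (list : List String) (out : String) : Prop := out = list_title_string_alt list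
instance (list : List String) (out : String) : Decidable (Spec_list_title_string list out) := by unfold Spec_list_title_string; infer_instance

-- ===== CLAIM (what is proved, stated in full; the proofs are below) =====
def Claim_equal_list_title_string : Prop := ∀ (list : List String), Dom_list_title_string list → Spec_list_title_string list (list_title_string list)

-- ===== LEMMAS AND PROOFS =====

theorem pv_app_assoc (a b c : String) : a ++ b ++ c = a ++ (b ++ c) := by
  apply String.toList_inj.mp; simp

theorem pv_join_singleton (z : String) : PySem.Str.join ", " [z] = z := by
  apply String.toList_inj.mp
  simp [PySem.Str.toList_join, PySem.Chars.join_singleton]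

theorem pv_join_cons (w : String) (ts : List String) (h : ts ≠ []) :
    PySem.Str.join ", " (w :: ts) = w ++ ", " ++ PySem.Str.join ", " ts := by
  obtain ⟨b, ts', rfl⟩ := List.exists_cons_of_ne_nil h
  apply String.toList_inj.mp
  simp [PySem.Str.toList_join, PySem.Chars.join_cons_cons]

theorem pv_fold_join (g : String → String) (zs : List String) (z acc : String) :
    zs.foldl (fun a s => a ++ (g s ++ ", ")) acc ++ g z
      = acc ++ PySem.Str.join ", " ((zs ++ [z]).map g) := by
  induction zs generalizing acc with
  | nil =>
    simp only [List.foldl_nil, List.nil_append, List.map_cons, List.map_nil]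
    rw [pv_join_singleton]
  | cons w zs ih =>
    simp only [List.foldl_cons, List.cons_append, List.map_cons]
    rw [ih, pv_join_cons (g w) _ (by simp)]
    apply String.toList_inj.mp; simp

theorem pv_prefix (L : List String) (k : Nat) (hk : k ≤ L.length) (acc : String) :
    (PySem.List.pyRange 0 ((k : Nat) : Int) 1).foldl
        (fun a i => a ++ (pvTitle (PySem.List.pyGetD L i "") ++ ", ")) acc
      = (L.take k).foldl (fun a s => a ++ (pvTitle s ++ ", ")) acc := by
  induction k with
  | zero =>
    rw [show (((0 : Nat)) : Int) = 0 by simp, PySem.List.pyRange_one_eq_nil le_rfl]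
    simp
  | succ k ih =>
    rw [show (((k + 1 : Nat)) : Int) = ((k : Nat) : Int) + 1 by push_cast; ring]
    rw [PySem.List.pyRange_one_succ_right (by positivity), List.foldl_append]
    rw [ih (by omega)]
    simp only [List.foldl_cons, List.foldl_nil]
    rw [List.take_add_one, List.foldl_append]
    rw [List.getElem?_eq_getElem (by omega)]
    simp only [Option.toList_some, List.foldl_cons, List.foldl_nil]
    rw [PySem.List.pyGetD_natCast]
    rw [List.getD_eq_getElem _ _ (by omega)]

theorem pv_main (x y z : String) (rest : List String) :
    list_title_string (x :: y :: z :: rest) = list_title_string_alt (x :: y :: z :: rest) := by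
  set L := x :: y :: z :: rest with hL
  set m := rest.length with hm
  have hlen : L.length = m + 3 := by simp [hL, hm]
  have hlenI : PySem.List.len L = (m : Int) + 3 := by
    rw [PySem.List.len_eq, hlen]; push_cast; ring
  have hTne : L.map pvTitle ≠ [] := by simp [hL]
  -- B in explicit form
  have hB : list_title_string_alt L
      = PySem.Str.join ", " (PySem.List.slice (L.map pvTitle) none (some (-1))) ++ ", and "
          ++ PySem.List.pyGetD (L.map pvTitle) (-1) "" := by
    rw [hL]; try rfl
  have hlast : (L.map pvTitle).getLast hTne = pvTitle (L.getD (m + 2) "") := by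
    rw [List.getLast_eq_getElem]
    simp only [List.length_map, hlen, show m + 3 - 1 = m + 2 from by omega]
    rw [List.getElem_map]
    rw [List.getD_eq_getElem _ _ (by omega)]
  have htake : L.take (m + 2) = L.take (m + 1) ++ [L.getD (m + 1) ""] := by
    rw [show m + 2 = (m + 1) + 1 from rfl, List.take_add_one]
    rw [List.getElem?_eq_getElem (by omega)]
    rw [List.getD_eq_getElem _ _ (by omega)]
    simp
  have hdrop : (L.map pvTitle).dropLast = (L.take (m + 1) ++ [L.getD (m + 1) ""]).map pvTitle := by
    rw [List.dropLast_eq_take, List.length_map, hlen,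
        show m + 3 - 1 = m + 2 from by omega, ← List.map_take, htake]
  -- range split
  have hr : PySem.List.pyRange 0 (PySem.List.len L) 1
      = PySem.List.pyRange 0 ((m : Int) + 1) 1 ++ [(m : Int) + 1, (m : Int) + 2] := by
    rw [hlenI, PySem.List.pyRange_one_append 0 ((m : Int) + 1) ((m : Int) + 3) (by omega) (by omega)]
    congr 1
    rw [PySem.List.pyRange_one_cons (by omega)]
    congr 1
    rw [show ((m : Int) + 1 + 1) = (m : Int) + 2 by ring,
        show ((m : Int) + 3) = ((m : Int) + 2) + 1 by ring]
    exact PySem.List.pyRange_one_singleton _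
  -- loop-body evaluations
  have hmid : ∀ (acc : String) (i : Int), i ∈ PySem.List.pyRange 0 ((m : Int) + 1) 1 →
      pvBodyA L acc i = acc ++ (pvTitle (PySem.List.pyGetD L i "") ++ ", ") := by
    intro acc i hi
    rw [PySem.List.mem_pyRange_one] at hi
    unfold pvBodyA
    rw [hlenI, if_pos (by omega), if_neg (by omega), if_neg (by omega)]
  have hstep1 : ∀ acc : String, pvBodyA L acc ((m : Int) + 1)
      = acc ++ (pvTitle (PySem.List.pyGetD L ((m : Int) + 1) "") ++ ", and ") := by
    intro acc
    unfold pvBodyA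
    rw [hlenI, if_pos (by omega), if_pos (by omega)]
  have hstep2 : ∀ acc : String, pvBodyA L acc ((m : Int) + 2)
      = acc ++ pvTitle (PySem.List.pyGetD L ((m : Int) + 2) "") := by
    intro acc
    unfold pvBodyA
    rw [hlenI, if_pos (by omega), if_neg (by omega), if_pos (by omega)]
  have hg1 : PySem.List.pyGetD L ((m : Int) + 1) "" = L.getD (m + 1) "" := by
    rw [show ((m : Int) + 1) = ((m + 1 : Nat) : Int) by push_cast; ring, PySem.List.pyGetD_natCast]
  have hg2 : PySem.List.pyGetD L ((m : Int) + 2) "" = L.getD (m + 2) "" := by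
    rw [show ((m : Int) + 2) = ((m + 2 : Nat) : Int) by push_cast; ring, PySem.List.pyGetD_natCast]
  -- assemble A
  unfold list_title_string
  rw [hr, List.foldl_append]
  simp only [List.foldl_cons, List.foldl_nil]
  rw [hstep1, hstep2, hg1, hg2]
  have hP : (PySem.List.pyRange 0 ((m : Int) + 1) 1).foldl (pvBodyA L) ""
      = (L.take (m + 1)).foldl (fun a s => a ++ (pvTitle s ++ ", ")) "" := by
    refine Eq.trans (PySem.List.foldl_congr_mem _ (pvBodyA L)
        (fun a i => a ++ (pvTitle (PySem.List.pyGetD L i "") ++ ", ")) "" hmid) ?_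
    have h := pv_prefix L (m + 1) (by omega) ""
    rwa [show (((m + 1 : Nat)) : Int) = (m : Int) + 1 by push_cast; ring] at h
  rw [hP]
  rw [← pv_app_assoc _ (pvTitle (L.getD (m + 1) "")) ", and "]
  rw [pv_fold_join pvTitle (L.take (m + 1)) (L.getD (m + 1) "") ""]
  -- assemble B
  rw [hB, PySem.List.slice_to_neg_one, PySem.List.pyGetD_neg_one (h := hTne), hlast, hdrop]
  apply String.toList_inj.mp; simp

theorem pv_one (a : String) : list_title_string [a] = list_title_string_alt [a] := by
  have hr : PySem.List.pyRange 0 (PySem.List.len [a]) 1 = [0] := by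
    rw [show PySem.List.len [a] = 1 from by simp]; decide
  unfold list_title_string
  rw [hr]
  simp only [List.foldl_cons, List.foldl_nil]
  unfold pvBodyA
  norm_num [PySem.List.len_eq]
  rfl

theorem pv_two (a b : String) : list_title_string [a, b] = list_title_string_alt [a, b] := by
  have hr : PySem.List.pyRange 0 (PySem.List.len [a, b]) 1 = [0, 1] := by
    rw [show PySem.List.len [a, b] = 2 from by simp]; decide
  unfold list_title_string
  rw [hr]
  simp only [List.foldl_cons, List.foldl_nil]
  unfold pvBodyA
  norm_num [PySem.List.len_eq]
  rw [show PySem.List.pyGetD [a, b] (1 : Int) "" = b from by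
        rw [show (1 : Int) = ((1 : Nat) : Int) by simp, PySem.List.pyGetD_natCast]; simp]
  rfl

-- ===== VERDICT (by name: the statement is the Claim_ definition above) =====
theorem list_title_string_spec : Claim_equal_list_title_string := by
  intro list _
  unfold Spec_list_title_string
  match list with
  | [] => rfl
  | [a] => exact pv_one a
  | [a, b] => exact pv_two a b
  | x :: y :: z :: rest => exact pv_main x y z rest
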